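-- pv_equiv track=rewrite | github.com/cdecry/CSCA08 | Assignment2/starter/voting_systems.py | voting_range
-- ===== SOURCE A (Python) =====
-- from typing import Collection, List
--
-- def voting_range(range_ballots: List[List[int]],
--                  party_order: List[str]) -> List[int]:
--     """Return the total score for each party in range ballots
--     range_ballots, in the order specified in party_order.
--
--     Pre: len of each sublist of range_ballots is len(party_order)
--          the scores in each ballot are specified in the order of party_order
--
--     >>> voting_range([[1, 3, 4, 5], [5, 5, 1, 2], [1, 4, 1, 1]],
--     ...              SAMPLE_ORDER_1)
--     [7, 12, 6, 8]
--     """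
--
--     total_scores = []
--
--     for i in range(len(party_order)):
--         score = 0
--         for ballot in range_ballots:
--             score += ballot[i]
--         total_scores.append(score)
--
--     return total_scores
-- ===== SOURCE B (Python) =====
-- def voting_range(range_ballots, party_order):
--     """Fold over ballots, adding each ballot elementwise onto a totals vector."""
--     totals = [0] * len(party_order)
--     for ballot in range_ballots:
--         totals = [t + s for t, s in zip(totals, ballot)]
--     return totals
-- ===== Notes on version B (the rewrite author's own statement) =====
-- stated objective: alternative
-- what changed: B folds once over the ballots maintaining a per-party totals vector updated by an elementwise zip-add, instead of A's per-party column rescans over all ballots.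
import Mathlib
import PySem

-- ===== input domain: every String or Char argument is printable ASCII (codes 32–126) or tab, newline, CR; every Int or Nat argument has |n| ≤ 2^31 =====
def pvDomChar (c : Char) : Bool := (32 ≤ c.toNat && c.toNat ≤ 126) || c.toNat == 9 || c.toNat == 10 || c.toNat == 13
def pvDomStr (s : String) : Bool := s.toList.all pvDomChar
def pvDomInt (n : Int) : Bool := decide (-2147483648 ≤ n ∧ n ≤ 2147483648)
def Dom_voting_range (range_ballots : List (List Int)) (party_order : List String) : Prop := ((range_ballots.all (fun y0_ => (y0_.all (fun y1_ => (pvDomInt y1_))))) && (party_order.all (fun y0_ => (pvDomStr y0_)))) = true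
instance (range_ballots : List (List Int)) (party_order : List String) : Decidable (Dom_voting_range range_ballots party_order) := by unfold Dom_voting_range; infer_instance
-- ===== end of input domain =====

-- B folds once over the ballots, zip-adding each ballot onto a totals vector, instead of
-- A's per-party column rescans; same cost, different decomposition (objective: alternative).

-- ===== PORT A =====
-- ballot[i] is ported as pyGetD with default 0; Pre_ guarantees i is in range, as A's
-- docstring precondition states (out-of-range raises IndexError in Python).
def voting_range (range_ballots : List (List Int)) (party_order : List String) : List Int :=
  (PySem.List.pyRange 0 (party_order.length : Int) 1).foldl
    (fun total_scores i =>
      total_scores ++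
        [range_ballots.foldl (fun score ballot => score + PySem.List.pyGetD ballot i 0) 0])
    []

-- ===== PORT B =====
def voting_range_alt (range_ballots : List (List Int)) (party_order : List String) : List Int :=
  range_ballots.foldl
    (fun totals ballot => List.zipWith (· + ·) totals ballot)
    (List.replicate party_order.length 0)

-- ===== PRECONDITION & SPEC =====
-- A raises IndexError when some ballot is shorter than party_order; exactly those inputs are excluded.
def Pre_voting_range (range_ballots : List (List Int)) (party_order : List String) : Prop :=
  ∀ b ∈ range_ballots, party_order.length ≤ b.length

instance (range_ballots : List (List Int)) (party_order : List String) : Decidable (Pre_voting_range range_ballots party_order) := by unfold Pre_voting_range; infer_instance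

def pvWitness_voting_range : List (List Int) × List String :=
  ([[1, 3], [5, 5], [1, 4]], ["a", "b"])

def Spec_voting_range (range_ballots : List (List Int)) (party_order : List String) (out : List Int) : Prop := out = voting_range_alt range_ballots party_order
instance (range_ballots : List (List Int)) (party_order : List String) (out : List Int) : Decidable (Spec_voting_range range_ballots party_order out) := by unfold Spec_voting_range; infer_instance

-- ===== CLAIM (what is proved, stated in full; the proofs are below) =====
def Claim_equal_voting_range : Prop := ∀ (range_ballots : List (List Int)) (party_order : List String), Dom_voting_range range_ballots party_order → Pre_voting_range range_ballots party_order → Spec_voting_range range_ballots party_order (voting_range range_ballots party_order)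

-- ===== LEMMAS AND PROOFS =====

-- B's fold, started from any totals of length P, yields per-index totals plus column sums.
theorem fold_zipAdd_eq_map (P : Nat) (rb : List (List Int)) :
    ∀ totals : List Int, totals.length = P → (∀ b ∈ rb, P ≤ b.length) →
    rb.foldl (fun t b => List.zipWith (· + ·) t b) totals
      = (List.range P).map (fun k => totals.getD k 0 + (rb.map (fun b => b.getD k 0)).sum) := by
  induction rb with
  | nil =>
    intro totals hlen _
    simp only [List.foldl_nil, List.map_nil, List.sum_nil, add_zero]
    apply List.ext_getElem
    · simp [hlen]
    · intro k h1 h2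
      simp only [List.getElem_map, List.getElem_range]
      rw [List.getD_eq_getElem?_getD, List.getElem?_eq_getElem h1]
      rfl
  | cons b rest ih =>
    intro totals hlen hb
    have hbP : P ≤ b.length := hb b (by simp)
    have hzlen : (List.zipWith (· + ·) totals b).length = P := by
      simp [List.length_zipWith, hlen]; omega
    rw [List.foldl_cons, ih _ hzlen (fun x hx => hb x (by simp [hx]))]
    apply List.map_congr_left
    intro k hk
    have hkP : k < P := List.mem_range.mp hk
    have h1 : k < totals.length := by omega
    have h2 : k < b.length := by omega
    have hz : (List.zipWith (· + ·) totals b).getD k 0 = totals.getD k 0 + b.getD k 0 := by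
      rw [List.getD_eq_getElem?_getD, List.getD_eq_getElem?_getD, List.getD_eq_getElem?_getD]
      simp [h1, h2]
    rw [hz]
    simp [add_assoc]

-- ===== VERDICT (by name: the statement is the Claim_ definition above) =====
theorem voting_range_spec : Claim_equal_voting_range := by
  intro rb po _ hpre
  unfold Spec_voting_range voting_range voting_range_alt
  rw [PySem.List.foldl_append_singleton_eq_map, List.nil_append,
      fold_zipAdd_eq_map po.length rb (List.replicate po.length 0) (by simp) hpre,
      PySem.List.pyRange_zero_nat, List.map_map]
  apply List.map_congr_left
  intro k hk
  have hkP : k < po.length := List.mem_range.mp hk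
  have hrep : (List.replicate po.length (0 : Int)).getD k 0 = 0 := by
    simp [List.getD_eq_getElem?_getD, hkP]
  simp only [Function.comp_apply]
  rw [hrep, zero_add, PySem.List.foldl_add (g := fun b => PySem.List.pyGetD b (k : Int) 0),
      zero_add]
  congr 1
  apply List.map_congr_left
  intro b hb
  rw [PySem.List.pyGetD_natCast]
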